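-- pv_equiv track=rewrite | github.com/gunner6603/PS | 23-10/01 불 끄기.py | apply
-- ===== SOURCE A (Python) =====
-- def apply(prev_row, prev, pprev):
--     for i in range(10):
--         if prev & (1 << i) > 0:
--             if i == 0:
--                 prev_row ^= 3
--             elif i == 9:
--                 prev_row ^= 3 << 8
--             else:
--                 prev_row ^= 7 << (i - 1)
--
--     prev_row ^= pprev
--
--     return prev_row
-- ===== SOURCE B (Python) =====
-- def apply(prev_row, prev, pprev):
--     p = prev & 0x3FF
--     toggle = (p ^ (p << 1) ^ (p >> 1)) & 0x3FF
--     return prev_row ^ toggle ^ pprev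
-- ===== Notes on version B (the rewrite author's own statement) =====
-- stated objective: simpler
-- what changed: Replaces the 10-iteration loop with per-bit case analysis (XORing a 3/7-wide mask for each set bit of prev) by a single closed-form bit trick: toggle = (p ^ (p<<1) ^ (p>>1)) & 0x3FF on p = prev & 0x3FF, then one XOR chain.
import Mathlib
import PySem

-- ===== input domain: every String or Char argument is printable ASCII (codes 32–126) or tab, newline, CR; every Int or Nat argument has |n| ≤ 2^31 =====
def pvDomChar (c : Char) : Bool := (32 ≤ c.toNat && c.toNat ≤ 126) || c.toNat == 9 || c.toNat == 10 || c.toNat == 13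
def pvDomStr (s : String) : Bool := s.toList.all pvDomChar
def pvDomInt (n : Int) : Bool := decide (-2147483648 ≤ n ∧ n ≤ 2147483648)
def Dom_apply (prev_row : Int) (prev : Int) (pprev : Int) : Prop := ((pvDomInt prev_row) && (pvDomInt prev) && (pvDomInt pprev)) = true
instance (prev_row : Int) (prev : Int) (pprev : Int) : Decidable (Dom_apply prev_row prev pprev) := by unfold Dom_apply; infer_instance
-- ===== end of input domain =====

-- B replaces A's 10-iteration mask loop by one closed-form bitwise toggle expression (simpler).

-- ===== PORT A =====
-- loop body of A's for-loop, as a helper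
def applyStep (prev : Int) (acc : Int) (i : Nat) : Int :=
  if 0 < PySem.Int.band prev ((1:Int) <<< i) then
    if i = 0 then PySem.Int.bxor acc 3
    else if i = 9 then PySem.Int.bxor acc ((3:Int) <<< (8:Nat))
    else PySem.Int.bxor acc ((7:Int) <<< (i-1))
  else acc

def apply (prev_row : Int) (prev : Int) (pprev : Int) : Int :=
  PySem.Int.bxor ((List.range 10).foldl (applyStep prev) prev_row) pprev

-- ===== PORT B =====
def apply_alt (prev_row : Int) (prev : Int) (pprev : Int) : Int :=
  let p := PySem.Int.band prev 1023
  let toggle := PySem.Int.band (PySem.Int.bxor (PySem.Int.bxor p (p <<< (1:Nat))) (p >>> (1:Nat))) 1023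
  PySem.Int.bxor (PySem.Int.bxor prev_row toggle) pprev

-- ===== PRECONDITION & SPEC =====
def Spec_apply (prev_row : Int) (prev : Int) (pprev : Int) (out : Int) : Prop := out = apply_alt prev_row prev pprev
instance (prev_row : Int) (prev : Int) (pprev : Int) (out : Int) : Decidable (Spec_apply prev_row prev pprev out) := by unfold Spec_apply; infer_instance

-- ===== CLAIM (what is proved, stated in full; the proofs are below) =====
def Claim_equal_apply : Prop := ∀ (prev_row : Int) (prev : Int) (pprev : Int), Dom_apply prev_row prev pprev → Spec_apply prev_row prev pprev (apply prev_row prev pprev)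

-- ===== LEMMAS AND PROOFS =====

-- Nat-level mirror of A's loop masks and step
def mNat (i : Nat) : Nat := if i = 0 then 3 else if i = 9 then 3 <<< 8 else 7 <<< (i-1)
def stepN (n : Nat) (acc : Nat) (i : Nat) : Nat := if 0 < n &&& (1 <<< i) then acc ^^^ mNat i else acc
def stepI (n : Nat) (acc : Int) (i : Nat) : Int := if 0 < n &&& (1 <<< i) then PySem.Int.bxor acc ↑(mNat i) else acc
def toggleNat (n : Nat) : Nat := (n ^^^ (n <<< 1) ^^^ (n >>> 1)) &&& 1023

theorem bxor_negSucc_natCast (k m : Nat) :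
    PySem.Int.bxor (Int.negSucc k) ↑m = Int.negSucc (k ^^^ m) := by
  have h3 : ¬ ((k:Int) ≤ -1) := by omega
  simp [PySem.Int.bxor, Int.negSucc_eq, h3]
  ring

theorem bxor_bxor_natCast (a : Int) (m n : Nat) :
    PySem.Int.bxor (PySem.Int.bxor a ↑m) ↑n = PySem.Int.bxor a ↑(m ^^^ n) := by
  rcases a with k | k
  · simp [PySem.Int.bxor, Int.ofNat_eq_natCast, Nat.xor_assoc]
  · rw [bxor_negSucc_natCast, bxor_negSucc_natCast, bxor_negSucc_natCast, Nat.xor_assoc]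

theorem band_negSucc_natCast (k m : Nat) :
    PySem.Int.band (Int.negSucc k) ↑m = ↑(m - (m &&& k)) := by
  have h3 : ¬ ((k:Int) ≤ -1) := by omega
  simp [PySem.Int.band, Int.negSucc_eq, h3]

theorem natfold (n : Nat) (l : List Nat) : ∀ x : Nat, l.foldl (stepN n) x = x ^^^ l.foldl (stepN n) 0 := by
  induction l with
  | nil => intro x; simp
  | cons i l ih =>
    intro x
    simp only [List.foldl]
    rw [ih (stepN n x i), ih (stepN n 0 i)]
    have hx : stepN n x i = x ^^^ stepN n 0 i := by
      unfold stepN; split_ifs <;> simp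
    rw [hx, Nat.xor_assoc]

theorem intfold (n : Nat) (l : List Nat) : ∀ a : Int, l.foldl (stepI n) a = PySem.Int.bxor a ↑(l.foldl (stepN n) 0) := by
  induction l with
  | nil => intro a; simp
  | cons i l ih =>
    intro a
    simp only [List.foldl]
    rw [ih (stepI n a i)]
    have hs : stepI n a i = PySem.Int.bxor a ↑(stepN n 0 i) := by
      unfold stepI stepN; split_ifs <;> simp
    rw [hs, bxor_bxor_natCast, natfold n l (stepN n 0 i)]

set_option maxRecDepth 16384 in
theorem foldEqToggle : ∀ n < 1024, (List.range 10).foldl (stepN n) 0 = toggleNat n := by decide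

theorem mask_and_1023 : ∀ i < 10, (1023 &&& (1 <<< i) : Nat) = 1 <<< i := by decide

set_option maxRecDepth 16384 in
theorem sub_and_lemma : ∀ m < 1024, ∀ i < 10, ((1 <<< i) - ((1 <<< i) &&& m) : Nat) = (1023 - m) &&& (1 <<< i) := by decide

theorem prevChar (prev : Int) : ∃ n : Nat, n < 1024 ∧ PySem.Int.band prev 1023 = ↑n ∧
    ∀ i : Nat, i < 10 → PySem.Int.band prev ((1:Int) <<< i) = ((n &&& (1 <<< i) : Nat) : Int) := by
  rcases prev with k | k
  · refine ⟨k &&& 1023, by have := Nat.and_le_right (n := k) (m := 1023); omega, ?_, ?_⟩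
    · show PySem.Int.band ((k : Nat) : Int) (((1023 : Nat)) : Int) = (((k &&& 1023 : Nat)) : Int)
      exact PySem.Int.band_natCast k 1023
    · intro i hi
      show PySem.Int.band ((k : Nat) : Int) (((1 <<< i : Nat)) : Int) = _
      rw [PySem.Int.band_natCast]
      congr 1
      rw [Nat.and_assoc, mask_and_1023 i hi]
  · refine ⟨1023 - (1023 &&& k), by omega, ?_, ?_⟩
    · show PySem.Int.band (Int.negSucc k) (((1023 : Nat)) : Int) = _
      rw [band_negSucc_natCast]
    · intro i hi
      show PySem.Int.band (Int.negSucc k) (((1 <<< i : Nat)) : Int) = _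
      rw [band_negSucc_natCast]
      congr 1
      have hk : ((1 <<< i) &&& k : Nat) = (1 <<< i) &&& (1023 &&& k) := by
        rw [← Nat.and_assoc]
        rw [show ((1 <<< i) &&& 1023 : Nat) = 1023 &&& (1 <<< i) from Nat.and_comm _ _, mask_and_1023 i hi]
      rw [hk]
      have hm : (1023 &&& k : Nat) < 1024 := by
        have := Nat.and_le_left (n := 1023) (m := k); omega
      exact sub_and_lemma (1023 &&& k) hm i hi
theorem step_eq (prev : Int) (n : Nat)
    (h : ∀ i : Nat, i < 10 → PySem.Int.band prev ((1:Int) <<< i) = ((n &&& (1 <<< i) : Nat) : Int)) :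
    ∀ i : Nat, i < 10 → ∀ a : Int, applyStep prev a i = stepI n a i := by
  intro i hi a
  unfold applyStep stepI
  rw [h i hi]
  simp only [Int.natCast_pos]
  interval_cases i <;> norm_num [mNat]
theorem foldl_congr' (f g : Int → Nat → Int) (l : List Nat) (h : ∀ i ∈ l, ∀ a, f a i = g a i) :
    ∀ a, l.foldl f a = l.foldl g a := by
  induction l with
  | nil => intro a; rfl
  | cons i l ih =>
    intro a
    simp only [List.foldl]
    rw [h i (List.mem_cons_self), ih (fun j hj a => h j (List.mem_cons_of_mem i hj) a)]

theorem alt_char (prev_row prev pprev : Int) (n : Nat) (hp : PySem.Int.band prev 1023 = ↑n) :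
    apply_alt prev_row prev pprev = PySem.Int.bxor (PySem.Int.bxor prev_row ((toggleNat n : Nat) : Int)) pprev := by
  show PySem.Int.bxor (PySem.Int.bxor prev_row (PySem.Int.band (PySem.Int.bxor (PySem.Int.bxor (PySem.Int.band prev 1023) ((PySem.Int.band prev 1023) <<< (1:Nat))) ((PySem.Int.band prev 1023) >>> (1:Nat))) 1023)) pprev = _
  rw [hp]
  rw [show ((n:Int) <<< (1:Nat)) = ((n <<< 1 : Nat) : Int) from rfl,
      show ((n:Int) >>> (1:Nat)) = ((n >>> 1 : Nat) : Int) from rfl,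
      show (1023:Int) = ((1023:Nat):Int) from rfl]
  simp only [PySem.Int.bxor_natCast, PySem.Int.band_natCast]
  rfl
-- ===== VERDICT (by name: the statement is the Claim_ definition above) =====
theorem apply_spec : Claim_equal_apply := by
  intro prev_row prev pprev _
  unfold Spec_apply
  obtain ⟨n, hn, hp, hi⟩ := prevChar prev
  rw [alt_char prev_row prev pprev n hp]
  unfold apply
  rw [foldl_congr' (applyStep prev) (stepI n) (List.range 10)
        (fun i hm a => step_eq prev n hi i (List.mem_range.mp hm) a) prev_row,
      intfold n (List.range 10) prev_row, foldEqToggle n hn]
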